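-- pv_equiv track=rewrite | github.com/kika1s1/Codeforces-Contest-Solutions | Codeforces Round 943 (Div. 3)/G_1_Division_LCP_easy_version.py | find_maximal_lcp
-- ===== SOURCE A (Python) =====
-- def find_maximal_lcp(s, l, r):
--     n = len(s)
--     maximal_lcp = []
--     for k in range(l, r + 1):
--         max_lcp = 0
--         for i in range(n - k + 1):
--             substrings = [s[i + j:i + j + k] for j in range(k)]
--             lcp = min(len(substrings[j]) for j in range(1, k))
--             max_lcp = max(max_lcp, lcp)
--         maximal_lcp.append(max_lcp)
--     return maximal_lcp
-- ===== SOURCE B (Python) =====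
-- def find_maximal_lcp(s, l, r):
--     # Closed form: the inner double loop's value for each k is min(k, n-k+1), clamped at 0.
--     n = len(s)
--     return [max(0, min(k, n - k + 1)) for k in range(l, r + 1)]
-- ===== Notes on version B (the rewrite author's own statement) =====
-- stated objective: simpler
-- what changed: B replaces A's triple nested loop (enumerating all k-substring slices and taking min/max of their lengths) by the closed form max(0, min(k, n-k+1)) per k, which is what A's inner loops compute.
import Mathlib
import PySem

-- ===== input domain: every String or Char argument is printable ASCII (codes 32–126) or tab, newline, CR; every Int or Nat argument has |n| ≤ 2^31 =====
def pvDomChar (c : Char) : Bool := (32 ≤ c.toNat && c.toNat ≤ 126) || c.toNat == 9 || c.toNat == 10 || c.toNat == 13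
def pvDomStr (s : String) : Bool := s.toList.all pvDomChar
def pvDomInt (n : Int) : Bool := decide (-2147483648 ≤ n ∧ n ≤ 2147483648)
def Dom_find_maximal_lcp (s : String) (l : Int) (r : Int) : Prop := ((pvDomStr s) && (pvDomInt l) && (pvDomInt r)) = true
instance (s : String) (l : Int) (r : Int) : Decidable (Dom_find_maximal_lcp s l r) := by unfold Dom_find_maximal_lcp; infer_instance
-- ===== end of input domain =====

-- B replaces A's triple nested loop by the closed form max(0, min(k, n-k+1)) per k (simpler: no nested loops).
-- A raises ValueError (min of an empty sequence) when the first k = l satisfies l ≤ 1 and l ≤ len(s); those inputs are outside Pre_.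

-- ===== PORT A =====
-- literal transliteration of A; Python's `min(...)` raises on an empty sequence, the `.getD 0`
-- totalizes that case, which Pre_find_maximal_lcp excludes.
def find_maximal_lcp (s : String) (l : Int) (r : Int) : List Int :=
  let cs := s.toList
  let n : Int := cs.length
  (PySem.List.pyRange l (r + 1) 1).foldl (fun acc k =>
    let max_lcp : Int :=
      (PySem.List.pyRange 0 (n - k + 1) 1).foldl (fun max_lcp i =>
        let substrings : List (List Char) :=
          (PySem.List.pyRange 0 k 1).map
            (fun j => PySem.List.slice cs (some (i + j)) (some (i + j + k)))
        let lcp : Int :=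
          (PySem.List.min? ((PySem.List.pyRange 1 k 1).map
            (fun j => ((PySem.List.pyGetD substrings j []).length : Int)))
              (fun x => x)).getD 0
        max max_lcp lcp) 0
    acc ++ [max_lcp]) []

-- ===== PORT B =====
def find_maximal_lcp_alt (s : String) (l : Int) (r : Int) : List Int :=
  let n : Int := s.toList.length
  (PySem.List.pyRange l (r + 1) 1).map (fun k => max 0 (min k (n - k + 1)))

-- ===== PRECONDITION & SPEC =====
-- Pre_ excludes exactly the inputs on which A raises ValueError: the first loop value k = l
-- reaches `min()` over an empty generator iff l ≤ r and l ≤ 1 and l ≤ len(s).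
def Pre_find_maximal_lcp (s : String) (l : Int) (r : Int) : Prop :=
  ¬ (l ≤ r ∧ l ≤ 1 ∧ l ≤ (s.toList.length : Int))
instance (s : String) (l : Int) (r : Int) : Decidable (Pre_find_maximal_lcp s l r) := by
  unfold Pre_find_maximal_lcp; infer_instance

def pvWitness_find_maximal_lcp : String × Int × Int := ("abab", 2, 3)

def Spec_find_maximal_lcp (s : String) (l : Int) (r : Int) (out : List Int) : Prop :=
  out = find_maximal_lcp_alt s l r
instance (s : String) (l : Int) (r : Int) (out : List Int) : Decidable (Spec_find_maximal_lcp s l r out) := by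
  unfold Spec_find_maximal_lcp; infer_instance

-- ===== CLAIM (what is proved, stated in full; the proofs are below) =====
def Claim_equal_find_maximal_lcp : Prop := ∀ (s : String) (l : Int) (r : Int), Dom_find_maximal_lcp s l r → Pre_find_maximal_lcp s l r → Spec_find_maximal_lcp s l r (find_maximal_lcp s l r)

-- ===== LEMMAS AND PROOFS =====

-- folding max over values all ≤ the accumulator leaves the accumulator unchanged
theorem pv_foldl_max_const (f : Int → Int) (c : Int) :
    ∀ (xs : List Int), (∀ x ∈ xs, f x ≤ c) →
      xs.foldl (fun m x => max m (f x)) c = c := by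
  intro xs
  induction xs with
  | nil => intro _; rfl
  | cons x xs ih =>
    intro h
    have hx : f x ≤ c := h x (List.mem_cons_self)
    have : max c (f x) = c := by omega
    simpa [List.foldl_cons, this] using ih (fun y hy => h y (List.mem_cons_of_mem _ hy))

-- length of the slice s[i+j : i+j+k] as an Int
theorem pv_slice_len (cs : List Char) (i j k : Int)
    (hi : 0 ≤ i) (hj : 1 ≤ j) (hjk : j < k) (hik : i + k ≤ (cs.length : Int)) :
    ((PySem.List.slice cs (some (i + j)) (some (i + j + k))).length : Int)
      = min k ((cs.length : Int) - i - j) := by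
  rw [PySem.List.slice_toNat cs (by omega) (by omega)]
  simp only [List.length_take, List.length_drop]
  omega

-- the inner `min(...)` equals min k (n - i - k + 1)
theorem pv_inner_min (cs : List Char) (i k : Int)
    (hk : 2 ≤ k) (hi : 0 ≤ i) (hik : i + k ≤ (cs.length : Int)) :
    (PySem.List.min? ((PySem.List.pyRange 1 k 1).map
        (fun j => ((PySem.List.pyGetD
            ((PySem.List.pyRange 0 k 1).map
              (fun j => PySem.List.slice cs (some (i + j)) (some (i + j + k)))) j []).length : Int)))
          (fun x => x)).getD 0
      = min k ((cs.length : Int) - i - k + 1) := by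
  set n : Int := (cs.length : Int) with hn
  have hmap : (PySem.List.pyRange 1 k 1).map
      (fun j => ((PySem.List.pyGetD
          ((PySem.List.pyRange 0 k 1).map
            (fun j => PySem.List.slice cs (some (i + j)) (some (i + j + k)))) j []).length : Int))
      = (PySem.List.pyRange 1 k 1).map (fun j => min k (n - i - j)) := by
    apply List.map_congr_left
    intro j hjmem
    have hj := (PySem.List.mem_pyRange_one).1 hjmem
    rw [PySem.List.pyGetD_map_pyRange_of_nonneg _ k j _ (by omega) (by omega)]
    exact pv_slice_len cs i j k hi hj.1 hj.2 hik
  rw [hmap]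
  -- the mapped list is nonempty, so min? = some m for some m
  have hne : (PySem.List.pyRange 1 k 1).map (fun j => min k (n - i - j)) ≠ [] := by
    have : (k - 1) ∈ PySem.List.pyRange 1 k 1 := PySem.List.mem_pyRange_one.2 (by omega)
    intro hnil
    exact (List.map_eq_nil_iff.1 hnil ▸ (List.not_mem_nil (a := k - 1))) this
  obtain ⟨m, hm⟩ : ∃ m, PySem.List.min? ((PySem.List.pyRange 1 k 1).map (fun j => min k (n - i - j))) (fun x => x) = some m := by
    cases hmin : PySem.List.min? ((PySem.List.pyRange 1 k 1).map (fun j => min k (n - i - j))) (fun x => x) with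
    | none => exact absurd ((PySem.List.min?_eq_none_iff _ _).1 hmin) hne
    | some m => exact ⟨m, rfl⟩
  rw [hm]
  -- m is a value of the list, all of which are ≥ min k (n-i-k+1)
  have hmem := PySem.List.min?_mem hm
  obtain ⟨j, hjmem, hje⟩ := List.mem_map.1 hmem
  have hj := (PySem.List.mem_pyRange_one).1 hjmem
  -- m ≤ the last value min k (n-i-(k-1))
  have hlast : (min k (n - i - (k - 1))) ∈ (PySem.List.pyRange 1 k 1).map (fun j => min k (n - i - j)) :=
    List.mem_map.2 ⟨k - 1, PySem.List.mem_pyRange_one.2 (by omega), rfl⟩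
  have hle := PySem.List.min?_isMin hm _ hlast
  simp only [Option.getD_some]
  omega

-- the inner double loop of A computes the closed form, for every non-raising k
theorem pv_inner_loop (cs : List Char) (k : Int)
    (hk : 2 ≤ k ∨ (cs.length : Int) < k) :
    (PySem.List.pyRange 0 ((cs.length : Int) - k + 1) 1).foldl (fun max_lcp i =>
        max max_lcp
          ((PySem.List.min? ((PySem.List.pyRange 1 k 1).map
            (fun j => ((PySem.List.pyGetD
                ((PySem.List.pyRange 0 k 1).map
                  (fun j => PySem.List.slice cs (some (i + j)) (some (i + j + k)))) j []).length : Int)))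
              (fun x => x)).getD 0)) 0
      = max 0 (min k ((cs.length : Int) - k + 1)) := by
  set n : Int := (cs.length : Int) with hn
  by_cases hkn : n < k
  · rw [show PySem.List.pyRange 0 (n - k + 1) 1 = [] from PySem.List.pyRange_one_eq_nil (by omega)]
    simp only [List.foldl_nil]
    omega
  · have hk2 : 2 ≤ k := by omega
    have hcongr := PySem.List.foldl_congr_mem
      (l := PySem.List.pyRange 0 (n - k + 1) 1)
      (init := (0 : Int))
      (f := fun max_lcp i =>
        max max_lcp
          ((PySem.List.min? ((PySem.List.pyRange 1 k 1).map
            (fun j => ((PySem.List.pyGetD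
                ((PySem.List.pyRange 0 k 1).map
                  (fun j => PySem.List.slice cs (some (i + j)) (some (i + j + k)))) j []).length : Int)))
              (fun x => x)).getD 0))
      (g := fun max_lcp i => max max_lcp (min k (n - i - k + 1)))
      (by
        intro acc i himem
        have hi := (PySem.List.mem_pyRange_one).1 himem
        beta_reduce
        rw [pv_inner_min cs i k hk2 hi.1 (by omega)])
    rw [hcongr]
    rw [show PySem.List.pyRange 0 (n - k + 1) 1 = 0 :: PySem.List.pyRange (0 + 1) (n - k + 1) 1
      from PySem.List.pyRange_one_cons (by omega)]
    simp only [List.foldl_cons, zero_add]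
    have h0 : max (0 : Int) (min k (n - 0 - k + 1)) = min k (n - k + 1) := by omega
    rw [h0]
    rw [pv_foldl_max_const (fun i => min k (n - i - k + 1)) (min k (n - k + 1))
      (PySem.List.pyRange 1 (n - k + 1) 1)
      (by
        intro x hx
        have := (PySem.List.mem_pyRange_one).1 hx
        show min k (n - x - k + 1) ≤ min k (n - k + 1)
        omega)]
    omega

-- ===== VERDICT (by name: the statement is the Claim_ definition above) =====
theorem find_maximal_lcp_spec : Claim_equal_find_maximal_lcp := by
  intro s l r _ hpre
  unfold Spec_find_maximal_lcp find_maximal_lcp find_maximal_lcp_alt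
  simp only []
  rw [PySem.List.foldl_append_singleton_eq_map]
  rw [List.nil_append]
  apply List.map_congr_left
  intro k hkmem
  have hk := (PySem.List.mem_pyRange_one).1 hkmem
  unfold Pre_find_maximal_lcp at hpre
  have : 2 ≤ k ∨ (s.toList.length : Int) < k := by omega
  exact pv_inner_loop s.toList k this
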